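-- pv_equiv track=rewrite | github.com/manvithachingtha/-Implement-a-digital-signal-generator2 | Extra.py | encode_ami
-- ===== SOURCE A (Python) =====
-- def encode_ami(data):
--     signal = []
--     last = 1
--     for bit in data:
--         if bit == '1':
--             signal.append(last)
--             last *= -1
--         else:
--             signal.append(0)
--     return signal
-- ===== SOURCE B (Python) =====
-- def encode_ami(data):
--     bits = list(data)
--     levels = [0] * len(bits)
--     ones = [i for i, b in enumerate(bits) if b == '1']
--     for k, idx in enumerate(ones):
--         levels[idx] = 1 if k % 2 == 0 else -1
--     return levels
-- ===== Notes on version B (the rewrite author's own statement) =====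
-- stated objective: alternative
-- what changed: Replaces the running sign-toggle single pass with an index table of the positions of one-bits plus a parity-driven fill into a preallocated zero list.
import Mathlib
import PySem

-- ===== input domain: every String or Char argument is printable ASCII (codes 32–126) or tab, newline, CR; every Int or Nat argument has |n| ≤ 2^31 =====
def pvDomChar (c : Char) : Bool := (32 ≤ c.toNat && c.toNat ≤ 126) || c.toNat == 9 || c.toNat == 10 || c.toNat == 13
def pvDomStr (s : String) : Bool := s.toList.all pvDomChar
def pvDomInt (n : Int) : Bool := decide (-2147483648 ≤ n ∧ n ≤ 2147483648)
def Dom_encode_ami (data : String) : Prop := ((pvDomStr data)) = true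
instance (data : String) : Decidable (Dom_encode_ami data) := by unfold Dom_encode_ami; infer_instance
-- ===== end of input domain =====

-- B replaces A's running sign-toggle with an index table of '1' positions and a parity-driven fill (alternative decomposition, same cost).

-- ===== PORT A =====
-- single pass appending to `signal` while toggling `last`
def encode_ami (data : String) : List Int :=
  (data.toList.foldl
    (fun (st : List Int × Int) bit =>
      if bit = '1' then (st.1 ++ [st.2], st.2 * (-1)) else (st.1 ++ [0], st.2))
    ([], 1)).1

-- ===== PORT B =====
-- zero signal of the same length, table of '1' positions, parity-driven fill
def encode_ami_alt (data : String) : List Int :=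
  let bits := data.toList
  let signal : List Int := List.replicate bits.length 0
  let ones : List Int := ((PySem.List.enumerate bits).filter (fun p => p.2 == '1')).map Prod.fst
  (PySem.List.enumerate ones).foldl
    (fun sig p => sig.set p.2.toNat (if p.1 % 2 == 0 then (1 : Int) else -1)) signal

-- ===== PRECONDITION & SPEC =====
def Spec_encode_ami (data : String) (out : List Int) : Prop := out = encode_ami_alt data
instance (data : String) (out : List Int) : Decidable (Spec_encode_ami data out) := by unfold Spec_encode_ami; infer_instance

-- ===== CLAIM (what is proved, stated in full; the proofs are below) =====
def Claim_equal_encode_ami : Prop := ∀ (data : String), Dom_encode_ami data → Spec_encode_ami data (encode_ami data)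

-- ===== LEMMAS AND PROOFS =====

-- common specification: k = number of '1' seen so far; a '1' gets +1 on even k, -1 on odd k
def gSpec : List Char → Int → List Int
  | [], _ => []
  | c :: cs, k =>
      if c = '1' then (if k % 2 == 0 then (1 : Int) else -1) :: gSpec cs (k + 1)
      else 0 :: gSpec cs k

-- A-side: the foldl with running sign equals gSpec, sign determined by parity of k
theorem encode_ami_foldl (l : List Char) :
    ∀ (acc : List Int) (k : Int), 0 ≤ k →
    (l.foldl (fun (st : List Int × Int) bit =>
       if bit = '1' then (st.1 ++ [st.2], st.2 * (-1)) else (st.1 ++ [0], st.2))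
      (acc, if k % 2 == 0 then 1 else -1)).1 = acc ++ gSpec l k := by
  induction l with
  | nil => intro acc k hk; simp [gSpec]
  | cons c cs ih =>
    intro acc k hk
    by_cases hc : c = '1'
    · have hsign : (if k % 2 == 0 then (1:Int) else -1) * (-1)
          = if (k + 1) % 2 == 0 then (1:Int) else -1 := by
        by_cases h2 : k % 2 = 0 <;> simp_all <;> omega
      subst hc
      simp only [List.foldl_cons, if_true, hsign]
      rw [ih (acc ++ [if k % 2 == 0 then (1:Int) else -1]) (k + 1) (by omega)]
      simp [gSpec]
    · simp only [List.foldl_cons, if_neg hc]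
      rw [ih (acc ++ [(0:Int)]) k hk]
      simp [gSpec, hc]

-- the '1'-position table, parameterised by the enumeration start
def onesF (bits : List Char) (s : Int) : List Int :=
  ((PySem.List.enumerate bits s).filter (fun p => p.2 == '1')).map Prod.fst

theorem enumerate_shift {α : Type} (bits : List α) :
    ∀ s : Int, PySem.List.enumerate bits (s + 1)
      = (PySem.List.enumerate bits s).map (fun p => (p.1 + 1, p.2)) := by
  induction bits with
  | nil => intro s; simp [PySem.List.enumerate_nil]
  | cons c cs ih =>
    intro s
    rw [PySem.List.enumerate_cons, PySem.List.enumerate_cons, ih (s + 1)]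
    simp

theorem onesF_shift (bits : List Char) (s : Int) :
    onesF bits (s + 1) = (onesF bits s).map (· + 1) := by
  unfold onesF
  rw [enumerate_shift]
  rw [List.filter_map, List.map_map]
  simp [Function.comp_def]

theorem onesF_nonneg (bits : List Char) (s : Int) :
    ∀ i ∈ onesF bits s, s ≤ i := by
  intro i hi
  unfold onesF at hi
  obtain ⟨p, hp, rfl⟩ := List.mem_map.mp hi
  have := List.mem_of_mem_filter hp
  obtain ⟨j, hj, rfl⟩ := (PySem.List.mem_enumerate_iff _ _ _).mp this
  simp

-- filling (x :: sig) at positions shifted by one equals x :: the unshifted fill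
theorem fill_cons_skip (l : List Int) :
    ∀ (k : Int) (x : Int) (sig : List Int), (∀ i ∈ l, 0 ≤ i) →
    ((PySem.List.enumerate (l.map (· + 1)) k).foldl
       (fun sig p => sig.set p.2.toNat (if p.1 % 2 == 0 then (1 : Int) else -1)) (x :: sig))
    = x :: (PySem.List.enumerate l k).foldl
       (fun sig p => sig.set p.2.toNat (if p.1 % 2 == 0 then (1 : Int) else -1)) sig := by
  induction l with
  | nil => intro k x sig _; simp [PySem.List.enumerate_nil]
  | cons i l ih =>
    intro k x sig hpos
    have hi : (0:Int) ≤ i := hpos i (by simp)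
    have htn : (i + 1).toNat = i.toNat + 1 := by omega
    rw [List.map_cons, PySem.List.enumerate_cons, PySem.List.enumerate_cons]
    simp only [List.foldl_cons, htn, List.set_cons_succ]
    exact ih (k + 1) x _ (fun j hj => hpos j (by simp [hj]))

-- B-side: the parity fill over the '1'-position table equals gSpec
theorem fill_eq_gSpec (bits : List Char) :
    ∀ (k : Int), 0 ≤ k →
    ((PySem.List.enumerate (onesF bits 0) k).foldl
       (fun sig p => sig.set p.2.toNat (if p.1 % 2 == 0 then (1 : Int) else -1))
       (List.replicate bits.length 0))
    = gSpec bits k := by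
  induction bits with
  | nil => intro k hk; simp [onesF, PySem.List.enumerate_nil, gSpec]
  | cons c cs ih =>
    intro k hk
    have hsh := onesF_shift cs 0
    unfold onesF at hsh
    have hnn : ∀ i ∈ onesF cs 0, (0:Int) ≤ i := onesF_nonneg cs 0
    by_cases hc : c = '1'
    · have hones : onesF (c :: cs) 0 = 0 :: (onesF cs 0).map (· + 1) := by
        subst hc
        unfold onesF
        rw [PySem.List.enumerate_cons]
        have hf : List.filter (fun p => p.2 == '1')
              ((((0:Int)), '1') :: PySem.List.enumerate cs (0 + 1))
            = (((0:Int)), '1') :: List.filter (fun p => p.2 == '1')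
                (PySem.List.enumerate cs (0 + 1)) := by
          simp
        rw [hf, List.map_cons, hsh]
      rw [hones, PySem.List.enumerate_cons]
      simp only [List.foldl_cons, List.length_cons, List.replicate_succ]
      have hset : (((0:Int) :: List.replicate cs.length 0).set ((0:Int)).toNat
          (if k % 2 == 0 then (1:Int) else -1))
          = (if k % 2 == 0 then (1:Int) else -1) :: List.replicate cs.length 0 := by
        simp
      rw [hset, fill_cons_skip _ _ _ _ hnn, ih (k + 1) (by omega)]
      simp [gSpec, hc]
    · have hones : onesF (c :: cs) 0 = (onesF cs 0).map (· + 1) := by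
        unfold onesF
        rw [PySem.List.enumerate_cons]
        have hf : List.filter (fun p => p.2 == '1')
              ((((0:Int)), c) :: PySem.List.enumerate cs (0 + 1))
            = List.filter (fun p => p.2 == '1') (PySem.List.enumerate cs (0 + 1)) := by
          simp [hc]
        rw [hf, hsh]
      rw [hones]
      simp only [List.length_cons, List.replicate_succ]
      rw [fill_cons_skip _ _ _ _ hnn, ih k hk]
      simp [gSpec, hc]

theorem encode_ami_eq (data : String) : encode_ami data = gSpec data.toList 0 := by
  unfold encode_ami
  have := encode_ami_foldl data.toList [] 0 (by omega)
  simpa using this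

theorem encode_ami_alt_eq (data : String) : encode_ami_alt data = gSpec data.toList 0 := by
  unfold encode_ami_alt
  have := fill_eq_gSpec data.toList 0 (by omega)
  simpa [onesF] using this

-- ===== VERDICT (by name: the statement is the Claim_ definition above) =====
theorem encode_ami_spec : Claim_equal_encode_ami := by
  intro data _
  unfold Spec_encode_ami
  rw [encode_ami_eq, encode_ami_alt_eq]
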